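-- pv_equiv track=rewrite | github.com/Nedoko-maki/EE40098-Coursework | hollandschema.py | defining_length
-- ===== SOURCE A (Python) =====
-- def defining_length(schema):
--     """Finds the defining length of the schema (Holland's Schema)
--
--     :param schema: schema string
--     :type schema: str
--     :return: the defining length
--     :rtype: int
--     """
--     first, last = 0, 0
--     for i, c in enumerate(schema):
--         if c != "*":
--             first = i
--             break
--
--     for i, c in enumerate(reversed(schema)):
--         if c != "*":
--             last = len(schema) - i - 1
--             break
--
--     return abs(last - first)
-- ===== SOURCE B (Python) =====
-- def defining_length(schema):
--     s = schema.strip("*")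
--     return len(s) - 1 if s else 0
-- ===== Notes on version B (the rewrite author's own statement) =====
-- stated objective: simpler
-- what changed: Replaces the two explicit index-scan loops (forward and reversed) with a single strip('*') boundary trim and a length computation.
import Mathlib
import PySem

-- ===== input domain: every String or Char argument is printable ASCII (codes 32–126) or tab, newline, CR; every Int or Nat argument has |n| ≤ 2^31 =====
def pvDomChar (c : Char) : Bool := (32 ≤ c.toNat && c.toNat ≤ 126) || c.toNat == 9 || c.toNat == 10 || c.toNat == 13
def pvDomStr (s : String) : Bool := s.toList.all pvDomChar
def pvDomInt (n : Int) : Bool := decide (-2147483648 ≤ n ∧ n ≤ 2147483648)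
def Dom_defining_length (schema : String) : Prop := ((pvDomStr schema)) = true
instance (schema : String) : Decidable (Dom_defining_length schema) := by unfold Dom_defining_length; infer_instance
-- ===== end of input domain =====

-- B replaces A's two explicit index-scan loops by one strip('*') boundary trim plus a length computation (objective: simpler).

-- ===== PORT A =====
-- first loop: 'for i, c in enumerate(schema): if c != "*": first = i; break' (default 0)
def pyFirstAux : List Char → Nat → Nat
  | [], _ => 0
  | c :: r, i => if c ≠ '*' then i else pyFirstAux r (i + 1)

-- second loop: 'for i, c in enumerate(reversed(schema)): if c != "*": last = len(schema) - i - 1; break' (default 0)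
def pyLastAux (n : Nat) : List Char → Nat → Nat
  | [], _ => 0
  | c :: r, i => if c ≠ '*' then n - i - 1 else pyLastAux n r (i + 1)

def defining_length (schema : String) : Int :=
  let l := schema.toList
  let first := pyFirstAux l 0
  let last := pyLastAux l.length l.reverse 0
  ((((last : Int) - (first : Int)).natAbs : Nat) : Int)

-- ===== PORT B =====
-- schema.strip("*") ported by hand (exact: Python strip with a char set removes exactly the
-- maximal leading and trailing runs of characters drawn from that set)
def stripStars (l : List Char) : List Char :=
  ((l.dropWhile (· == '*')).reverse.dropWhile (· == '*')).reverse

def defining_length_alt (schema : String) : Int :=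
  let s := stripStars schema.toList
  if s.isEmpty then 0 else (s.length : Int) - 1

-- ===== PRECONDITION & SPEC =====
def Spec_defining_length (schema : String) (out : Int) : Prop := out = defining_length_alt schema
instance (schema : String) (out : Int) : Decidable (Spec_defining_length schema out) := by unfold Spec_defining_length; infer_instance

-- ===== CLAIM (what is proved, stated in full; the proofs are below) =====
def Claim_equal_defining_length : Prop := ∀ (schema : String), Dom_defining_length schema → Spec_defining_length schema (defining_length schema)

-- ===== LEMMAS AND PROOFS =====

theorem pyFirstAux_eq (l : List Char) (i : Nat) :
    pyFirstAux l i =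
      if l.dropWhile (· == '*') = [] then 0 else i + (l.takeWhile (· == '*')).length := by
  induction l generalizing i with
  | nil => simp [pyFirstAux]
  | cons c r ih =>
    by_cases hc : c = '*'
    · subst hc
      simp [pyFirstAux, ih]
      split <;> omega
    · simp [pyFirstAux, hc]

theorem pyLastAux_eq (n : Nat) (l : List Char) (i : Nat) :
    pyLastAux n l i =
      if l.dropWhile (· == '*') = [] then 0 else n - (i + (l.takeWhile (· == '*')).length) - 1 := by
  induction l generalizing i with
  | nil => simp [pyLastAux]
  | cons c r ih =>
    by_cases hc : c = '*'
    · subst hc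
      simp [pyLastAux, ih]
      split <;> omega
    · simp [pyLastAux, hc]

theorem len_takeWhile_add_dropWhile {α} (p : α → Bool) (xs : List α) :
    (xs.takeWhile p).length + (xs.dropWhile p).length = xs.length := by
  conv_rhs => rw [← List.takeWhile_append_dropWhile (p := p) (l := xs)]
  rw [List.length_append]

-- the trailing-star run of l equals the trailing-star run of l with its leading stars removed
theorem takeWhile_reverse_dropWhile (l : List Char) (h : l.dropWhile (· == '*') ≠ []) :
    ((l.dropWhile (· == '*')).reverse.takeWhile (· == '*')) =
      (l.reverse.takeWhile (· == '*')) := by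
  conv_rhs => rw [← List.takeWhile_append_dropWhile (p := (· == '*')) (l := l)]
  rw [List.reverse_append, List.takeWhile_append]
  split
  · next hlen =>
    exfalso
    have heq := (List.takeWhile_prefix (p := (· == '*'))
      (l := (l.dropWhile (· == '*')).reverse)).eq_of_length hlen
    have hall : ∀ x ∈ (l.dropWhile (· == '*')).reverse, (x == '*') = true := by
      intro x hx; rw [← heq] at hx
      exact List.mem_takeWhile_imp (p := (· == '*')) hx
    have hhead := List.head_dropWhile_not (· == '*') h
    have := hall ((l.dropWhile (· == '*')).head h)
      (List.mem_reverse.mpr (List.head_mem h))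
    rw [hhead] at this
    exact Bool.false_ne_true this
  · rfl

-- ===== VERDICT (by name: the statement is the Claim_ definition above) =====
theorem defining_length_spec : Claim_equal_defining_length := by
  intro schema _
  unfold Spec_defining_length defining_length defining_length_alt
  set l := schema.toList with hl
  by_cases h : l.dropWhile (· == '*') = []
  · have h2 : l.reverse.dropWhile (· == '*') = [] := by
      rw [List.dropWhile_eq_nil_iff] at h ⊢
      intro x hx; exact h x (List.mem_reverse.mp hx)
    simp [stripStars, pyFirstAux_eq, pyLastAux_eq, h, h2]
  · have hhead := List.head_dropWhile_not (· == '*') h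
    have hmem : (l.dropWhile (· == '*')).head h ∈ (l.dropWhile (· == '*')).reverse :=
      List.mem_reverse.mpr (List.head_mem h)
    have hmem_l : (l.dropWhile (· == '*')).head h ∈ l :=
      (List.dropWhile_sublist _).mem (List.head_mem h)
    have hrev : l.reverse.dropWhile (· == '*') ≠ [] := by
      rw [Ne, List.dropWhile_eq_nil_iff]; push Not
      exact ⟨_, List.mem_reverse.mpr hmem_l, by simp [hhead]⟩
    have hs_ne : (l.dropWhile (· == '*')).reverse.dropWhile (· == '*') ≠ [] := by
      rw [Ne, List.dropWhile_eq_nil_iff]; push Not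
      exact ⟨_, hmem, by simp [hhead]⟩
    have hlen_d := len_takeWhile_add_dropWhile (· == '*') l
    have hlen_rev : (l.reverse.takeWhile (· == '*')).length
        + (l.reverse.dropWhile (· == '*')).length = l.length := by
      rw [len_takeWhile_add_dropWhile (· == '*') l.reverse, List.length_reverse]
    have hsplit : ((l.dropWhile (· == '*')).reverse.takeWhile (· == '*')).length
        + ((l.dropWhile (· == '*')).reverse.dropWhile (· == '*')).length
        = (l.dropWhile (· == '*')).length := by
      rw [len_takeWhile_add_dropWhile (· == '*'), List.length_reverse]
    have htw := takeWhile_reverse_dropWhile l h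
    rw [htw] at hsplit
    have hs_len : 1 ≤ ((l.dropWhile (· == '*')).reverse.dropWhile (· == '*')).length :=
      List.length_pos_of_ne_nil hs_ne
    simp only [stripStars, pyFirstAux_eq, pyLastAux_eq, h, hrev, if_false,
      List.isEmpty_iff, List.reverse_eq_nil_iff, List.length_reverse]
    rw [if_neg hs_ne]
    omega
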